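-- pv_equiv track=rewrite | github.com/koorbmeh/Archi | src/tools/content_creator.py | _parse_reddit_post
-- ===== SOURCE A (Python) =====
-- def _parse_reddit_post(text: str) -> tuple:
--     """Parse TITLE: / BODY: format from generated reddit content."""
--     title, body = None, None
--     lines = text.split("\n")
--     body_start = None
--     for i, line in enumerate(lines):
--         if line.strip().upper().startswith("TITLE:"):
--             title = line.split(":", 1)[1].strip()
--         elif line.strip().upper().startswith("BODY:"):
--             body_start = i + 1
--             break
--     if body_start is not None:
--         body = "\n".join(lines[body_start:]).strip()
--     return (title, body)
-- ===== SOURCE B (Python) =====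
-- def _parse_reddit_post(text: str) -> tuple:
--     """Locate the first BODY: marker, then search the prefix backwards for the last TITLE:."""
--     lines = text.split("\n")
--     body_index = next((i for i, line in enumerate(lines)
--                        if line.strip().upper().startswith("BODY:")), None)
--     if body_index is None:
--         body = None
--         prefix = lines
--     else:
--         body = "\n".join(lines[body_index + 1:]).strip()
--         prefix = lines[:body_index]
--     title_line = next((line for line in reversed(prefix)
--                        if line.strip().upper().startswith("TITLE:")), None)
--     title = None if title_line is None else title_line.split(":", 1)[1].strip()
--     return (title, body)
-- ===== Notes on version B (the rewrite author's own statement) =====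
-- stated objective: alternative
-- what changed: Replaces A's single forward loop with mutable break state by a locate-first-BODY pass (next over enumerate) followed by a separate backwards scan of the prefix for the last TITLE line.
import Mathlib
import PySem

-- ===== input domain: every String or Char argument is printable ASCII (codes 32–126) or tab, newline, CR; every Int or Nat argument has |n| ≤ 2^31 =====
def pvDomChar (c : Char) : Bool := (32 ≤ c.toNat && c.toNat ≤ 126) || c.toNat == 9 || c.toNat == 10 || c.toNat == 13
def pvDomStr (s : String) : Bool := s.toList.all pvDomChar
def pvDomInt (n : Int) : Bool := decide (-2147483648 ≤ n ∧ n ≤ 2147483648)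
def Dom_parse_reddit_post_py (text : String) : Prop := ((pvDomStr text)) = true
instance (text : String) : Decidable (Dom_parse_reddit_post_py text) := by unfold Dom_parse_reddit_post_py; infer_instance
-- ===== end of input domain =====

-- B splits A's loop-with-break into a locate-first-BODY pass plus a backwards prefix scan for TITLE (alternative decomposition, same cost).

-- line.strip().upper().startswith(p)
def pvMarker (line p : String) : Bool :=
  PySem.Str.startswith (PySem.Str.upper (PySem.Str.strip line)) p

-- line.split(":", 1)[1].strip() (the index is always in range when the TITLE test fired)
def pvTitleVal (line : String) : String :=
  PySem.Str.strip ((PySem.List.pyGet? ((PySem.Str.splitMax? line ":" 1).getD []) 1).getD "")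

-- ===== PORT A =====
-- A's for-loop over enumerate(lines) with break: state = title; result = (title, body_start?)
def pvLoopA : List (Int × String) → Option String → Option String × Option Int
  | [], t => (t, none)
  | (i, l) :: rest, t =>
      if pvMarker l "TITLE:" then pvLoopA rest (some (pvTitleVal l))
      else if pvMarker l "BODY:" then (t, some (i + 1))
      else pvLoopA rest t

def parse_reddit_post_py (text : String) : Option String × Option String :=
  let lines := (PySem.Str.split? text "\n").getD []
  match pvLoopA (PySem.List.enumerate lines 0) none with
  | (t, some bs) => (t, some (PySem.Str.strip (PySem.Str.join "\n" (PySem.List.slice lines (some bs) none))))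
  | (t, none) => (t, none)

-- ===== PORT B =====
def parse_reddit_post_py_alt (text : String) : Option String × Option String :=
  let lines := (PySem.Str.split? text "\n").getD []
  let bodyIndex := lines.findIdx? (fun l => pvMarker l "BODY:")      -- next((i for i, line in enumerate(lines) …), None)
  let body := bodyIndex.map (fun bi =>
    PySem.Str.strip (PySem.Str.join "\n" (PySem.List.slice lines (some ((bi : Int) + 1)) none)))
  let pfx := match bodyIndex with
    | none => lines
    | some bi => lines.take bi                                       -- lines[:body_index]
  let titleLine := pfx.reverse.find? (fun l => pvMarker l "TITLE:")  -- next over reversed(prefix)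
  (titleLine.map pvTitleVal, body)

-- ===== PRECONDITION & SPEC =====
def Spec_parse_reddit_post_py (text : String) (out : Option String × Option String) : Prop := out = parse_reddit_post_py_alt text
instance (text : String) (out : Option String × Option String) : Decidable (Spec_parse_reddit_post_py text out) := by unfold Spec_parse_reddit_post_py; infer_instance

-- ===== CLAIM (what is proved, stated in full; the proofs are below) =====
def Claim_equal_parse_reddit_post_py : Prop := ∀ (text : String), Dom_parse_reddit_post_py text → Spec_parse_reddit_post_py text (parse_reddit_post_py text)

-- ===== LEMMAS AND PROOFS =====

-- a line cannot start with both "TITLE:" and "BODY:"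
theorem pvMarker_disj (l : String) (h : pvMarker l "TITLE:" = true) :
    pvMarker l "BODY:" = false := by
  unfold pvMarker at *
  simp only [PySem.Str.startswith_eq] at *
  rw [PySem.Chars.startswith_iff] at h
  by_contra hb
  rw [Bool.not_eq_false, PySem.Chars.startswith_iff] at hb
  obtain ⟨u, hu⟩ := h
  obtain ⟨v, hv⟩ := hb
  rw [← hu] at hv
  simp at hv

theorem pvLoopA_eq (lines : List String) : ∀ (s : Int) (t : Option String),
    pvLoopA (PySem.List.enumerate lines s) t =
      match lines.findIdx? (fun l => pvMarker l "BODY:") with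
      | some k => ((((lines.take k).reverse.find? (fun l => pvMarker l "TITLE:")).map pvTitleVal).or t, some (s + k + 1))
      | none => (((lines.reverse.find? (fun l => pvMarker l "TITLE:")).map pvTitleVal).or t, none) := by
  induction lines with
  | nil => intro s t; simp [pvLoopA, PySem.List.enumerate]
  | cons l rest ih =>
    intro s t
    rw [PySem.List.enumerate_cons]
    by_cases hT : pvMarker l "TITLE:" = true
    · have hB := pvMarker_disj l hT
      simp only [pvLoopA, hT, if_true, List.findIdx?_cons, hB, Bool.false_eq_true, if_false]
      rw [ih (s + 1) (some (pvTitleVal l))]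
      cases hk : rest.findIdx? (fun l => pvMarker l "BODY:") with
      | none =>
        simp [List.find?_append, hT]
      | some k =>
        simp [List.find?_append, hT]
        omega
    · simp only [Bool.not_eq_true] at hT
      by_cases hB : pvMarker l "BODY:" = true
      · simp [pvLoopA, hT, hB, List.findIdx?_cons]
      · simp only [Bool.not_eq_true] at hB
        simp only [pvLoopA, hT, Bool.false_eq_true, if_false, hB, List.findIdx?_cons]
        rw [ih (s + 1) t]
        cases hk : rest.findIdx? (fun l => pvMarker l "BODY:") with
        | none =>
          simp [List.find?_append, hT]
        | some k =>
          simp [List.find?_append, hT]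
          omega

-- ===== VERDICT (by name: the statement is the Claim_ definition above) =====
theorem parse_reddit_post_py_spec : Claim_equal_parse_reddit_post_py := by
  unfold Claim_equal_parse_reddit_post_py
  intro text _
  simp only [Spec_parse_reddit_post_py, parse_reddit_post_py, parse_reddit_post_py_alt]
  rw [pvLoopA_eq]
  cases hk : ((PySem.Str.split? text "\n").getD []).findIdx? (fun l => pvMarker l "BODY:") with
  | none => simp
  | some k => simp
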